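-- pv_equiv track=rewrite | github.com/deadcoast/ctx-card | docs/Legacy-Versions/python_draft/ctx_three.py | longest_prefix_module
-- ===== SOURCE A (Python) =====
-- from typing import Dict, List, Tuple, Optional, Set
--
-- def longest_prefix_module(dotted: str, dotted_to_path: Dict[str,str]) -> Optional[str]:
--     """Return repo path for the longest dotted prefix that exists as a module."""
--     parts = dotted.split(".")
--     for i in range(len(parts), 0, -1):
--         cand = ".".join(parts[:i])
--         rp = dotted_to_path.get(cand)
--         if rp:
--             return rp
--     return None
-- ===== SOURCE B (Python) =====
-- def longest_prefix_module(dotted, dotted_to_path):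
--     """Return repo path for the longest dotted prefix that exists as a module."""
--     best = None
--     cand = ""
--     for i, part in enumerate(dotted.split(".")):
--         cand = part if i == 0 else cand + "." + part
--         rp = dotted_to_path.get(cand)
--         if rp:
--             best = rp
--     return best
-- ===== Notes on version B (the rewrite author's own statement) =====
-- stated objective: alternative
-- what changed: Replaced the backward scan over range(len(parts),0,-1) that re-joins parts[:i] and early-returns on the first truthy hit with a single forward pass that builds each dotted prefix incrementally by string concatenation and keeps the last truthy lookup in a running 'best' accumulator returned after the loop.
import Mathlib
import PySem

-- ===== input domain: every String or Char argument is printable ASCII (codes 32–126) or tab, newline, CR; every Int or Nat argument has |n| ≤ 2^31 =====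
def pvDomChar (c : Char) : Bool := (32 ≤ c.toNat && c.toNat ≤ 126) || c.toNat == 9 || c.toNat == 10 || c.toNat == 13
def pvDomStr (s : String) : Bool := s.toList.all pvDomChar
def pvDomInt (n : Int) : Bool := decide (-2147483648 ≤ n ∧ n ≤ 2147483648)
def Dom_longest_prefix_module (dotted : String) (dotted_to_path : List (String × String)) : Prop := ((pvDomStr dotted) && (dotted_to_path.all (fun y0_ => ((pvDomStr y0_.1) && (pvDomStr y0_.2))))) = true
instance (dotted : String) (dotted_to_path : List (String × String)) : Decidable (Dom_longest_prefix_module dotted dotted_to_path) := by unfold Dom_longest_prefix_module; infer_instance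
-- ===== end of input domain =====

-- B replaces A's backward early-return scan over prefix lengths by a single forward pass that
-- builds each dotted prefix incrementally and keeps the path of the last (= longest) truthy hit
-- (objective: alternative decomposition; same cost).

-- ===== PORT A =====
-- 'for i in range(len(parts), 0, -1): cand = ".".join(parts[:i]); rp = d.get(cand); if rp: return rp'
def pvLoopA (d : PySem.Dict String String) (parts : List String) : List Int → Option String
  | [] => none
  | i :: rest =>
      let cand := PySem.Str.join "." (PySem.List.slice parts none (some i))
      match d.get? cand with
      | some rp => if rp ≠ "" then some rp else pvLoopA d parts rest
      | none => pvLoopA d parts rest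

def longest_prefix_module (dotted : String) (dotted_to_path : List (String × String)) : Option String :=
  -- dotted.split(".") : the separator is the literal "." ≠ "", so split? is always some
  let parts := (PySem.Str.split? dotted ".").getD []
  pvLoopA (PySem.Dict.ofList dotted_to_path) parts (PySem.List.pyRange (parts.length : Int) 0 (-1))

-- ===== PORT B =====
-- 'for i, part in enumerate(parts): cand = part if i == 0 else cand + "." + part; if d.get(cand): best = d.get(cand)'
def pvLoopB (d : PySem.Dict String String) : List (Int × String) → Option String → String → Option String
  | [], best, _ => best
  | (i, part) :: rest, best, cand =>
      let cand' := if i == 0 then part else cand ++ "." ++ part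
      let best' := match d.get? cand' with
        | some rp => if rp ≠ "" then some rp else best
        | none => best
      pvLoopB d rest best' cand'

def longest_prefix_module_alt (dotted : String) (dotted_to_path : List (String × String)) : Option String :=
  pvLoopB (PySem.Dict.ofList dotted_to_path)
    (PySem.List.enumerate ((PySem.Str.split? dotted ".").getD []) 0) none ""

-- ===== PRECONDITION & SPEC =====
def Spec_longest_prefix_module (dotted : String) (dotted_to_path : List (String × String)) (out : Option String) : Prop := out = longest_prefix_module_alt dotted dotted_to_path
instance (dotted : String) (dotted_to_path : List (String × String)) (out : Option String) : Decidable (Spec_longest_prefix_module dotted dotted_to_path out) := by unfold Spec_longest_prefix_module; infer_instance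

-- ===== CLAIM (what is proved, stated in full; the proofs are below) =====
def Claim_equal_longest_prefix_module : Prop := ∀ (dotted : String) (dotted_to_path : List (String × String)), Dom_longest_prefix_module dotted dotted_to_path → Spec_longest_prefix_module dotted dotted_to_path (longest_prefix_module dotted dotted_to_path)

-- ===== LEMMAS AND PROOFS =====

-- 'rp = d.get(c); if rp:' — the truthy lookup both loops perform
def pvLookT (d : PySem.Dict String String) (c : String) : Option String :=
  match d.get? c with
  | some rp => if rp ≠ "" then some rp else none
  | none => none

-- first truthy hit scanning left to right
def pvFirstT (d : PySem.Dict String String) : List String → Option String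
  | [] => none
  | c :: cs => match pvLookT d c with
      | some r => some r
      | none => pvFirstT d cs

-- last truthy hit scanning left to right
def pvLastT (d : PySem.Dict String String) : List String → Option String
  | [] => none
  | c :: cs => match pvLastT d cs with
      | some r => some r
      | none => pvLookT d c

-- the incremental candidate strings B builds after the first part
def pvCands (c : String) : List String → List String
  | [] => []
  | p :: ps => (c ++ "." ++ p) :: pvCands (c ++ "." ++ p) ps

theorem pvLoopA_eq_firstT (d : PySem.Dict String String) (parts : List String) (is : List Int) :
    pvLoopA d parts is =
      pvFirstT d (is.map (fun i => PySem.Str.join "." (PySem.List.slice parts none (some i)))) := by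
  induction is with
  | nil => rfl
  | cons i rest ih =>
      simp only [pvLoopA, pvFirstT, List.map_cons, pvLookT]
      cases h : d.get? (PySem.Str.join "." (PySem.List.slice parts none (some i))) with
      | none => simpa using ih
      | some rp =>
          by_cases hrp : rp ≠ "" <;> simp [hrp, ih]

theorem pvFirstT_append (d : PySem.Dict String String) (as bs : List String) :
    pvFirstT d (as ++ bs) =
      match pvFirstT d as with
      | some r => some r
      | none => pvFirstT d bs := by
  induction as with
  | nil => simp [pvFirstT]
  | cons c cs ih =>
      simp only [List.cons_append, pvFirstT]
      cases pvLookT d c <;> simp [ih]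

theorem pvLastT_eq_firstT_reverse (d : PySem.Dict String String) (cs : List String) :
    pvLastT d cs = pvFirstT d cs.reverse := by
  induction cs with
  | nil => rfl
  | cons c cs ih =>
      simp only [pvLastT, List.reverse_cons, pvFirstT_append, ih]
      cases pvFirstT d cs.reverse with
      | some r => rfl
      | none =>
          simp only [pvFirstT]
          cases pvLookT d c <;> rfl

theorem pvCharsJoin_shift (sep a b : List Char) (rest : List (List Char)) :
    PySem.Chars.join sep (a :: b :: rest) = PySem.Chars.join sep ((a ++ sep ++ b) :: rest) := by
  cases rest with
  | nil => simp [PySem.Chars.join_cons_cons, PySem.Chars.join_singleton]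
  | cons r rs =>
      rw [PySem.Chars.join_cons_cons, PySem.Chars.join_cons_cons, PySem.Chars.join_cons_cons]
      simp [List.append_assoc]

theorem pvJoin_shift (rest : List String) (a b : String) :
    PySem.Str.join "." (a :: b :: rest) = PySem.Str.join "." ((a ++ "." ++ b) :: rest) := by
  show String.ofList _ = String.ofList _
  congr 1
  have hd : ("." : String).toList = ['.'] := by decide
  simp only [List.map_cons, String.toList_append, hd]
  exact pvCharsJoin_shift ['.'] a.toList b.toList (rest.map String.toList)

theorem pvJoin_singleton (x : String) : PySem.Str.join "." [x] = x := by
  show String.ofList _ = x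
  rw [List.map_singleton, PySem.Chars.join_singleton, String.ofList_toList]

theorem pvCands_eq_joins (ps : List String) (c : String) :
    (List.range ps.length).map (fun k => PySem.Str.join "." (c :: ps.take (k + 1))) = pvCands c ps := by
  induction ps generalizing c with
  | nil => rfl
  | cons p ps ih =>
      rw [List.length_cons, List.range_succ_eq_map, List.map_cons, List.map_map]
      have h0 : PySem.Str.join "." (c :: (p :: ps).take (0 + 1)) = c ++ "." ++ p := by
        rw [show (0 + 1) = 1 from rfl, List.take_succ_cons, List.take_zero]
        rw [pvJoin_shift, pvJoin_singleton]
      have ht : ((fun k => PySem.Str.join "." (c :: (p :: ps).take (k + 1))) ∘ (fun k => k + 1)) =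
          fun k => PySem.Str.join "." ((c ++ "." ++ p) :: ps.take (k + 1)) := by
        funext k
        simp only [Function.comp, List.take_succ_cons]
        exact pvJoin_shift _ c p
      rw [h0, ht, ih]
      rfl

theorem pvLoopB_eq_lastT (d : PySem.Dict String String) (xs : List String) (s : Int) (hs : 1 ≤ s)
    (best : Option String) (cand : String) :
    pvLoopB d (PySem.List.enumerate xs s) best cand =
      match pvLastT d (pvCands cand xs) with
      | some r => some r
      | none => best := by
  induction xs generalizing s best cand with
  | nil => rfl
  | cons p ps ih =>
      rw [PySem.List.enumerate_cons]
      have hne : s ≠ 0 := by omega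
      have h0 : (s == 0) = false := by simpa using hne
      simp only [pvLoopB, h0, Bool.false_eq_true, if_false]
      rw [ih (s + 1) (by omega)]
      simp only [pvCands, pvLastT]
      cases hL : pvLastT d (pvCands (cand ++ "." ++ p) ps) with
      | some r => rfl
      | none =>
          simp only [pvLookT]
          cases h : d.get? (cand ++ "." ++ p) with
          | none => rfl
          | some rp => by_cases hrp : rp ≠ "" <;> simp [hrp]

theorem pvA_eq_lastT (d : PySem.Dict String String) (parts : List String) :
    pvLoopA d parts (PySem.List.pyRange (parts.length : Int) 0 (-1)) =
      pvLastT d ((List.range parts.length).map (fun k => PySem.Str.join "." (parts.take (k + 1)))) := by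
  rw [pvLoopA_eq_firstT, PySem.List.pyRange_neg_one_eq_reverse, List.map_reverse,
    ← pvLastT_eq_firstT_reverse]
  congr 1
  rw [show ((0 : Int) + 1) = 1 from rfl, PySem.List.pyRange_one]
  have hn : ((parts.length : Int) + 1 - 1).toNat = parts.length := by omega
  rw [hn, List.map_map]
  apply List.map_congr_left
  intro k _
  simp only [Function.comp]
  have hsl : PySem.List.slice parts none (some (1 + (k : Int))) =
      parts.take ((1 + (k : Int)).toNat) := PySem.List.slice_to parts (by omega)
  have hk : ((1 + (k : Int)).toNat) = k + 1 := by omega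
  rw [hsl, hk]

theorem pvB_eq_lastT (d : PySem.Dict String String) (parts : List String) :
    pvLoopB d (PySem.List.enumerate parts 0) none "" =
      pvLastT d ((List.range parts.length).map (fun k => PySem.Str.join "." (parts.take (k + 1)))) := by
  cases parts with
  | nil => rfl
  | cons p ps =>
      rw [List.length_cons, List.range_succ_eq_map, List.map_cons, List.map_map]
      have h0 : PySem.Str.join "." ((p :: ps).take (0 + 1)) = p := by
        rw [show (0 + 1) = 1 from rfl, List.take_succ_cons, List.take_zero, pvJoin_singleton]
      have ht : ((fun k => PySem.Str.join "." ((p :: ps).take (k + 1))) ∘ (fun k => k + 1)) =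
          fun k => PySem.Str.join "." (p :: ps.take (k + 1)) := by
        funext k
        simp only [Function.comp, List.take_succ_cons]
      rw [h0, ht]
      rw [pvCands_eq_joins ps p]
      rw [PySem.List.enumerate_cons]
      simp only [pvLoopB, if_pos (by rfl : ((0 : Int) == 0) = true)]
      have h1 : ((0 : Int) + 1) = 1 := rfl
      rw [h1, pvLoopB_eq_lastT d ps 1 le_rfl]
      simp only [pvLastT, pvLookT]

-- ===== VERDICT (by name: the statement is the Claim_ definition above) =====
theorem longest_prefix_module_spec : Claim_equal_longest_prefix_module := by
  intro dotted dotted_to_path _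
  show longest_prefix_module dotted dotted_to_path = longest_prefix_module_alt dotted dotted_to_path
  simp only [longest_prefix_module, longest_prefix_module_alt]
  rw [pvA_eq_lastT, pvB_eq_lastT]
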